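-- pv_equiv track=rewrite | github.com/jsimmo45/Nematode-3D-Genome-PDE | interaction_scoring/plot_interaction_heatmap.py | _resolve_bins_for_chrom
-- ===== SOURCE A (Python) =====
-- def _resolve_bins_for_chrom(start, end, chrom, coord_to_bin, resolution):
--     """Resolve a genomic interval on one chromosome to (bin_start, bin_end).
--
--     Uses coord_to_bin dict filtered to matching chromosome.
--     Returns (bin_start, bin_end) where bin_end is exclusive, or (None, None).
--     """
--     if coord_to_bin is None:
--         return None, None
--
--     # Collect all bin entries for this chromosome, sorted by position
--     chrom_entries = sorted(
--         [(pos, idx) for (c, pos), idx in coord_to_bin.items() if c == chrom]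
--     )
--
--     if not chrom_entries:
--         return None, None
--
--     bin_start = None
--     bin_end   = None
--     for pos, bin_idx in chrom_entries:
--         if pos <= start:
--             bin_start = bin_idx
--         if pos < end:
--             bin_end = bin_idx
--
--     if bin_end is not None:
--         bin_end += 1  # exclusive
--
--     return bin_start, bin_end
-- ===== SOURCE B (Python) =====
-- def _resolve_bins_for_chrom(start, end, chrom, coord_to_bin, resolution):
--     """Single linear pass: track the lexicographically largest (pos, idx)
--     entry of the matching chromosome under each bound; no sort needed."""
--     if coord_to_bin is None:
--         return None, None
--
--     found = False
--     best_s = None  # max (pos, idx) with pos <= start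
--     best_e = None  # max (pos, idx) with pos < end
--     for (c, pos), idx in coord_to_bin.items():
--         if c != chrom:
--             continue
--         found = True
--         if pos <= start and (best_s is None or pos > best_s[0]
--                              or (pos == best_s[0] and idx > best_s[1])):
--             best_s = (pos, idx)
--         if pos < end and (best_e is None or pos > best_e[0]
--                           or (pos == best_e[0] and idx > best_e[1])):
--             best_e = (pos, idx)
--
--     if not found:
--         return None, None
--     bin_start = best_s[1] if best_s is not None else None
--     bin_end = best_e[1] + 1 if best_e is not None else None
--     return bin_start, bin_end
-- ===== Notes on version B (the rewrite author's own statement) =====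
-- stated objective: faster
-- what changed: Replaces A's build-filter-sort-then-scan with a single linear pass over the dict items that tracks the lexicographically largest (pos, idx) entry satisfying each bound, eliminating the sort entirely.
import Mathlib
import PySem

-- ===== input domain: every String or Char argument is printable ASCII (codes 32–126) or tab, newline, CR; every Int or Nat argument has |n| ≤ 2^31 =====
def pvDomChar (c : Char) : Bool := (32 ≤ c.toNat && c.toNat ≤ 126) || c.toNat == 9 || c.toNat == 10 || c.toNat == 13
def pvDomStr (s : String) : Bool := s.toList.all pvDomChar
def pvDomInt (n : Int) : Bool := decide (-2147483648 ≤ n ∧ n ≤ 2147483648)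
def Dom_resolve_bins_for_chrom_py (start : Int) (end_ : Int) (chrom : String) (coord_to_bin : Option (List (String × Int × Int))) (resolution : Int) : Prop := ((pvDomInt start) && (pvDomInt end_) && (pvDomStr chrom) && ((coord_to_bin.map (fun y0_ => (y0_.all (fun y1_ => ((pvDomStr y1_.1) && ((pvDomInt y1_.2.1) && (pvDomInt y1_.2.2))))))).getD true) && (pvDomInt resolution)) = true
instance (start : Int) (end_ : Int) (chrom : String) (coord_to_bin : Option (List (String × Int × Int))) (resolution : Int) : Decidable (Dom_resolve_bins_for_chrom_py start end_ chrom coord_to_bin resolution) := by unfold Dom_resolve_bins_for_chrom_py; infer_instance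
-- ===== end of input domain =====

-- B replaces A's filter-then-sort-then-scan by one linear pass over the dict items that
-- tracks the lexicographically largest (pos, idx) entry under each bound, skipping the sort.

-- ===== PORT A =====
def resolve_bins_for_chrom_py (start : Int) (end_ : Int) (chrom : String) (coord_to_bin : Option (List (String × Int × Int))) (resolution : Int) : Option Int × Option Int :=
  match coord_to_bin with
  | none => (none, none)
  | some items =>
    -- chrom_entries = sorted([(pos, idx) for (c, pos), idx in coord_to_bin.items() if c == chrom])
    let chrom_entries : List (Int × Int) :=
      PySem.List.sorted2
        (items.filterMap (fun e => if e.1 = chrom then some (e.2.1, e.2.2) else none))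
        Prod.fst Prod.snd
    if chrom_entries = [] then (none, none)
    else
      let st : Option Int × Option Int := chrom_entries.foldl
        (fun s p => (if p.1 ≤ start then some p.2 else s.1,
                     if p.1 < end_ then some p.2 else s.2)) (none, none)
      (st.1, st.2.map (· + 1))

-- ===== PORT B =====
-- best_s is None or pos > best_s[0] or (pos == best_s[0] and idx > best_s[1])
def pvBetter (b : Option (Int × Int)) (pos idx : Int) : Bool :=
  match b with
  | none => true
  | some m => decide (m.1 < pos) || (decide (pos = m.1) && decide (m.2 < idx))

def resolve_bins_for_chrom_py_alt (start : Int) (end_ : Int) (chrom : String) (coord_to_bin : Option (List (String × Int × Int))) (resolution : Int) : Option Int × Option Int :=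
  match coord_to_bin with
  | none => (none, none)
  | some items =>
    -- one pass: (found, best_s, best_e)
    let st : Bool × Option (Int × Int) × Option (Int × Int) := items.foldl
      (fun s e =>
        if e.1 = chrom then
          (true,
           (if e.2.1 ≤ start ∧ pvBetter s.2.1 e.2.1 e.2.2 then some (e.2.1, e.2.2) else s.2.1),
           (if e.2.1 < end_ ∧ pvBetter s.2.2 e.2.1 e.2.2 then some (e.2.1, e.2.2) else s.2.2))
        else s) (false, none, none)
    if st.1 then (st.2.1.map Prod.snd, st.2.2.map (fun m => m.2 + 1))
    else (none, none)

-- ===== PRECONDITION & SPEC =====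
def Spec_resolve_bins_for_chrom_py (start : Int) (end_ : Int) (chrom : String) (coord_to_bin : Option (List (String × Int × Int))) (resolution : Int) (out : Option Int × Option Int) : Prop := out = resolve_bins_for_chrom_py_alt start end_ chrom coord_to_bin resolution
instance (start : Int) (end_ : Int) (chrom : String) (coord_to_bin : Option (List (String × Int × Int))) (resolution : Int) (out : Option Int × Option Int) : Decidable (Spec_resolve_bins_for_chrom_py start end_ chrom coord_to_bin resolution out) := by unfold Spec_resolve_bins_for_chrom_py; infer_instance

-- ===== CLAIM (what is proved, stated in full; the proofs are below) =====
def Claim_equal_resolve_bins_for_chrom_py : Prop := ∀ (start : Int) (end_ : Int) (chrom : String) (coord_to_bin : Option (List (String × Int × Int))) (resolution : Int), Dom_resolve_bins_for_chrom_py start end_ chrom coord_to_bin resolution → Spec_resolve_bins_for_chrom_py start end_ chrom coord_to_bin resolution (resolve_bins_for_chrom_py start end_ chrom coord_to_bin resolution)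

-- ===== LEMMAS AND PROOFS =====

-- the strict lexicographic "before" relation PySem's sorted2 uses for a (fst, snd) tuple key
def pvBf (a b : Int × Int) : Bool := decide (a.1 < b.1) || (!decide (b.1 < a.1) && decide (a.2 < b.2))

-- the matching reflexive lexicographic order
def pvLe (p q : Int × Int) : Prop := p.1 < q.1 ∨ (p.1 = q.1 ∧ p.2 ≤ q.2)

lemma pvBf_iff (a b : Int × Int) : pvBf a b = true ↔ ¬ pvLe b a := by
  simp only [pvBf, pvLe, Bool.or_eq_true, Bool.and_eq_true, Bool.not_eq_true',
    decide_eq_true_eq, decide_eq_false_iff_not]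
  omega

lemma pvLe_refl (p : Int × Int) : pvLe p p := by simp [pvLe]

lemma pvLe_trans {p q r : Int × Int} (h1 : pvLe p q) (h2 : pvLe q r) : pvLe p r := by
  simp only [pvLe] at *; omega

lemma pvLe_total (p q : Int × Int) : pvLe p q ∨ pvLe q p := by
  simp only [pvLe]; omega

lemma pvLe_antisymm {p q : Int × Int} (h1 : pvLe p q) (h2 : pvLe q p) : p = q := by
  obtain ⟨p1, p2⟩ := p; obtain ⟨q1, q2⟩ := q
  simp only [pvLe] at *
  simp only [Prod.mk.injEq]
  omega

lemma pvBetter_some_iff (m p : Int × Int) : pvBetter (some m) p.1 p.2 = true ↔ ¬ pvLe p m := by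
  simp only [pvBetter, pvLe, Bool.or_eq_true, Bool.and_eq_true, decide_eq_true_eq]
  omega

lemma sorted2_eq_foldl (es : List (Int × Int)) :
    PySem.List.sorted2 es Prod.fst Prod.snd
      = es.foldl (fun acc x => PySem.List.insertBy pvBf x acc) [] := rfl

lemma insertBy_cons (x y : Int × Int) (ys : List (Int × Int)) :
    PySem.List.insertBy pvBf x (y :: ys)
      = if pvBf x y then x :: y :: ys else y :: PySem.List.insertBy pvBf x ys := rfl

lemma insertBy_pairwise (x : Int × Int) :
    ∀ l : List (Int × Int), l.Pairwise pvLe → (PySem.List.insertBy pvBf x l).Pairwise pvLe := by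
  intro l
  induction l with
  | nil => intro _; simp [PySem.List.insertBy]
  | cons y ys ih =>
    intro hp
    rw [List.pairwise_cons] at hp
    obtain ⟨hy, hys⟩ := hp
    rw [insertBy_cons]
    by_cases hb : pvBf x y = true
    · simp only [hb, if_true]
      have hxy : pvLe x y := by
        rcases pvLe_total x y with h | h
        · exact h
        · exact absurd h ((pvBf_iff x y).mp hb)
      refine List.Pairwise.cons ?_ (List.Pairwise.cons hy hys)
      intro z hz
      rcases List.mem_cons.mp hz with rfl | hz
      · exact hxy
      · exact pvLe_trans hxy (hy z hz)
    · simp only [hb]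
      refine List.Pairwise.cons ?_ (ih hys)
      intro z hz
      rcases (PySem.List.mem_insertBy pvBf x z ys).mp hz with hzx | hz
      · rw [hzx]
        exact not_not.mp (fun hyx => hb ((pvBf_iff x y).mpr hyx))
      · exact hy z hz

lemma sorted2_pairwise_lex (es : List (Int × Int)) :
    (PySem.List.sorted2 es Prod.fst Prod.snd).Pairwise pvLe := by
  rw [sorted2_eq_foldl]
  have h : ∀ (l acc : List (Int × Int)), acc.Pairwise pvLe →
      (l.foldl (fun a x => PySem.List.insertBy pvBf x a) acc).Pairwise pvLe := by
    intro l
    induction l with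
    | nil => intro acc h; simpa using h
    | cons x t ih => intro acc h; exact ih _ (insertBy_pairwise x acc h)
  exact h es [] (by simp)

-- A's loop keeps the LAST entry (in sorted order) satisfying the bound
def lastSat (q : Int × Int → Prop) [DecidablePred q] (l : List (Int × Int)) : Option (Int × Int) :=
  l.foldl (fun o p => if q p then some p else o) none

-- B's loop keeps the lexicographically LARGEST entry satisfying the bound
def bestStep (q : Int × Int → Prop) [DecidablePred q] (b : Option (Int × Int)) (p : Int × Int) :
    Option (Int × Int) :=
  if q p ∧ pvBetter b p.1 p.2 = true then some p else b

def bestSat (q : Int × Int → Prop) [DecidablePred q] (l : List (Int × Int)) : Option (Int × Int) :=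
  l.foldl (bestStep q) none

lemma lastSat_append (q : Int × Int → Prop) [DecidablePred q] (l : List (Int × Int)) (x : Int × Int) :
    lastSat q (l ++ [x]) = if q x then some x else lastSat q l := by
  simp [lastSat, List.foldl_append]

lemma bestSat_append (q : Int × Int → Prop) [DecidablePred q] (l : List (Int × Int)) (x : Int × Int) :
    bestSat q (l ++ [x]) = bestStep q (bestSat q l) x := by
  simp [bestSat, List.foldl_append]

lemma lastSat_char (q : Int × Int → Prop) [DecidablePred q] :
    ∀ l : List (Int × Int), l.Pairwise pvLe →
      (lastSat q l = none ↔ ∀ p ∈ l, ¬ q p) ∧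
      (∀ m, lastSat q l = some m → m ∈ l ∧ q m ∧ ∀ p ∈ l, q p → pvLe p m) := by
  intro l
  induction l using List.reverseRecOn with
  | nil =>
    intro _
    refine ⟨?_, ?_⟩
    · simp [lastSat]
    · intro m hm; simp [lastSat] at hm
  | append_singleton l x ih =>
    intro hp
    rw [List.pairwise_append] at hp
    obtain ⟨hl, _, hx⟩ := hp
    have hxall : ∀ p ∈ l, pvLe p x := fun p hpl => hx p hpl x (by simp)
    obtain ⟨ihn, ihs⟩ := ih hl
    rw [lastSat_append]
    by_cases hq : q x
    · simp only [hq, if_true]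
      refine ⟨?_, ?_⟩
      · constructor
        · intro h; exact absurd h (by simp)
        · intro h; exact absurd hq (h x (by simp))
      · intro m hm
        obtain rfl : x = m := by injection hm
        refine ⟨by simp, hq, ?_⟩
        intro p hpm _
        rcases List.mem_append.mp hpm with h | h
        · exact hxall p h
        · simp only [List.mem_singleton] at h; subst h; exact pvLe_refl _
    · simp only [hq, if_false]
      refine ⟨?_, ?_⟩
      · rw [ihn]
        constructor
        · intro h p hpm
          rcases List.mem_append.mp hpm with h' | h'
          · exact h p h'
          · simp only [List.mem_singleton] at h'; subst h'; exact hq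
        · intro h p hpl; exact h p (List.mem_append.mpr (Or.inl hpl))
      · intro m hm
        obtain ⟨hmem, hqm, hmax⟩ := ihs m hm
        refine ⟨List.mem_append.mpr (Or.inl hmem), hqm, ?_⟩
        intro p hpm hqp
        rcases List.mem_append.mp hpm with h | h
        · exact hmax p h hqp
        · simp only [List.mem_singleton] at h; subst h; exact absurd hqp hq

lemma bestSat_char (q : Int × Int → Prop) [DecidablePred q] :
    ∀ l : List (Int × Int),
      (bestSat q l = none ↔ ∀ p ∈ l, ¬ q p) ∧
      (∀ m, bestSat q l = some m → m ∈ l ∧ q m ∧ ∀ p ∈ l, q p → pvLe p m) := by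
  intro l
  induction l using List.reverseRecOn with
  | nil =>
    refine ⟨?_, ?_⟩
    · simp [bestSat]
    · intro m hm; simp [bestSat] at hm
  | append_singleton l x ih =>
    obtain ⟨ihn, ihs⟩ := ih
    rw [bestSat_append]
    by_cases hq : q x
    · cases hb : bestSat q l with
      | none =>
        have hstep : bestStep q none x = some x := by
          simp [bestStep, hq, pvBetter]
        rw [hstep]
        refine ⟨?_, ?_⟩
        · constructor
          · intro h; exact absurd h (by simp)
          · intro h; exact absurd hq (h x (by simp))
        · intro m hm
          obtain rfl : x = m := by injection hm
          refine ⟨by simp, hq, ?_⟩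
          intro p hpm hqp
          rcases List.mem_append.mp hpm with h | h
          · exact absurd hqp (ihn.mp hb p h)
          · simp only [List.mem_singleton] at h; subst h; exact pvLe_refl _
      | some m0 =>
        obtain ⟨hmem0, hqm0, hmax0⟩ := ihs m0 hb
        by_cases hbet : pvBetter (some m0) x.1 x.2 = true
        · have hstep : bestStep q (some m0) x = some x := by
            simp [bestStep, hq, hbet]
          rw [hstep]
          have hm0x : pvLe m0 x := by
            rcases pvLe_total m0 x with h | h
            · exact h
            · exact absurd h (fun hc => ((pvBetter_some_iff m0 x).mp hbet) h)
          refine ⟨?_, ?_⟩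
          · constructor
            · intro h; exact absurd h (by simp)
            · intro h; exact absurd hq (h x (by simp))
          · intro m hm
            obtain rfl : x = m := by injection hm
            refine ⟨by simp, hq, ?_⟩
            intro p hpm hqp
            rcases List.mem_append.mp hpm with h | h
            · exact pvLe_trans (hmax0 p h hqp) hm0x
            · simp only [List.mem_singleton] at h; subst h; exact pvLe_refl _
        · have hstep : bestStep q (some m0) x = some m0 := by
            simp [bestStep, hbet]
          rw [hstep]
          have hxm0 : pvLe x m0 := by
            by_contra h
            exact hbet ((pvBetter_some_iff m0 x).mpr h)
          refine ⟨?_, ?_⟩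
          · constructor
            · intro h; exact absurd h (by simp)
            · intro h; exact absurd hq (h x (by simp))
          · intro m hm
            obtain rfl : m0 = m := by injection hm
            refine ⟨List.mem_append.mpr (Or.inl hmem0), hqm0, ?_⟩
            intro p hpm hqp
            rcases List.mem_append.mp hpm with h | h
            · exact hmax0 p h hqp
            · simp only [List.mem_singleton] at h; subst h; exact hxm0
    · have hstep : bestStep q (bestSat q l) x = bestSat q l := by
        simp [bestStep, hq]
      rw [hstep]
      refine ⟨?_, ?_⟩
      · rw [ihn]
        constructor
        · intro h p hpm
          rcases List.mem_append.mp hpm with h' | h'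
          · exact h p h'
          · simp only [List.mem_singleton] at h'; subst h'; exact hq
        · intro h p hpl; exact h p (List.mem_append.mpr (Or.inl hpl))
      · intro m hm
        obtain ⟨hmem, hqm, hmax⟩ := ihs m hm
        refine ⟨List.mem_append.mpr (Or.inl hmem), hqm, ?_⟩
        intro p hpm hqp
        rcases List.mem_append.mp hpm with h | h
        · exact hmax p h hqp
        · simp only [List.mem_singleton] at h; subst h; exact absurd hqp hq

-- the heart of the equivalence: last-in-sorted-order = lexicographic max of the unsorted list
lemma last_sorted_eq_best (q : Int × Int → Prop) [DecidablePred q] (es : List (Int × Int)) :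
    lastSat q (PySem.List.sorted2 es Prod.fst Prod.snd) = bestSat q es := by
  have hperm := PySem.List.sorted2_perm es Prod.fst Prod.snd false
  have hmem : ∀ p : Int × Int, p ∈ PySem.List.sorted2 es Prod.fst Prod.snd ↔ p ∈ es :=
    fun p => hperm.mem_iff
  obtain ⟨hAn, hAs⟩ := lastSat_char q _ (sorted2_pairwise_lex es)
  obtain ⟨hBn, hBs⟩ := bestSat_char q es
  cases hL : lastSat q (PySem.List.sorted2 es Prod.fst Prod.snd) with
  | none =>
    cases hB : bestSat q es with
    | none => rfl
    | some m =>
      obtain ⟨hmem', hqm, _⟩ := hBs m hB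
      exact absurd hqm (hAn.mp hL m ((hmem m).mpr hmem'))
  | some m =>
    obtain ⟨hmemA, hqmA, hmaxA⟩ := hAs m hL
    cases hB : bestSat q es with
    | none => exact absurd hqmA (hBn.mp hB m ((hmem m).mp hmemA))
    | some m' =>
      obtain ⟨hmemB, hqmB, hmaxB⟩ := hBs m' hB
      have h1 : pvLe m m' := hmaxB m ((hmem m).mp hmemA) hqmA
      have h2 : pvLe m' m := hmaxA m' ((hmem m').mpr hmemB) hqmB
      exact congrArg some (pvLe_antisymm h1 h2)

lemma sorted2_eq_nil_iff (es : List (Int × Int)) :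
    PySem.List.sorted2 es Prod.fst Prod.snd = [] ↔ es = [] := by
  have hperm := PySem.List.sorted2_perm es Prod.fst Prod.snd false
  constructor
  · intro h; rw [h] at hperm; exact hperm.nil_eq.symm
  · intro h; subst h; rfl

-- A stores the index during the loop; the same as tracking the pair and projecting
lemma foldl_idx_eq_map (q : Int × Int → Prop) [DecidablePred q] (f : Int × Int → Int) :
    ∀ (l : List (Int × Int)) (b : Option (Int × Int)),
      l.foldl (fun o p => if q p then some (f p) else o) (b.map f)
        = (l.foldl (fun o p => if q p then some p else o) b).map f := by
  intro l
  induction l with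
  | nil => intro b; rfl
  | cons x t ih =>
    intro b
    by_cases hq : q x
    · simp only [List.foldl_cons, hq, if_true]
      exact ih (some x)
    · simp only [List.foldl_cons, hq, if_false]
      exact ih b

-- filtering on the chromosome inside the loop = folding over the filtered entry list
lemma foldl_chromFilter {β : Type} (chrom : String) (h : β → Int × Int → β) :
    ∀ (items : List (String × Int × Int)) (b : β),
      items.foldl (fun s e => if e.1 = chrom then h s (e.2.1, e.2.2) else s) b
        = (items.filterMap
            (fun e => if e.1 = chrom then some (e.2.1, e.2.2) else none)).foldl h b := by
  intro items
  induction items with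
  | nil => intro b; rfl
  | cons x t ih =>
    intro b
    by_cases hx : x.1 = chrom
    · simp only [List.foldl_cons, List.filterMap_cons, hx, if_true]
      exact ih (h b (x.2.1, x.2.2))
    · simp only [List.foldl_cons, List.filterMap_cons, hx, if_false]
      exact ih b

lemma foldl_flag_true : ∀ (l : List (Int × Int)), l.foldl (fun (_ : Bool) _ => true) true = true := by
  intro l
  induction l with
  | nil => rfl
  | cons x t ih => exact ih

lemma foldl_flag (l : List (Int × Int)) (b : Bool) :
    l.foldl (fun (_ : Bool) _ => true) b = (b || !l.isEmpty) := by
  cases l with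
  | nil => simp
  | cons x t => simp [foldl_flag_true]

-- ===== VERDICT (by name: the statement is the Claim_ definition above) =====
theorem resolve_bins_for_chrom_py_spec : Claim_equal_resolve_bins_for_chrom_py := by
  intro start end_ chrom coord_to_bin resolution _
  unfold Spec_resolve_bins_for_chrom_py resolve_bins_for_chrom_py resolve_bins_for_chrom_py_alt
  cases coord_to_bin with
  | none => rfl
  | some items =>
    simp only []
    set es : List (Int × Int) :=
      items.filterMap (fun e => if e.1 = chrom then some (e.2.1, e.2.2) else none) with hes
    have hsplit : ∀ (l : List (String × Int × Int)) (f : Bool) (a b : Option (Int × Int)),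
        List.foldl
          (fun (s : Bool × Option (Int × Int) × Option (Int × Int)) e =>
            if e.1 = chrom then
              (true, if e.2.1 ≤ start ∧ pvBetter s.2.1 e.2.1 e.2.2 = true then some (e.2.1, e.2.2) else s.2.1,
                if e.2.1 < end_ ∧ pvBetter s.2.2 e.2.1 e.2.2 = true then some (e.2.1, e.2.2) else s.2.2)
            else s) (f, a, b) l
        = (List.foldl (fun (s : Bool) e => if e.1 = chrom then true else s) f l,
           List.foldl (fun (t : Option (Int × Int)) e =>
             if e.1 = chrom then (if e.2.1 ≤ start ∧ pvBetter t e.2.1 e.2.2 = true then some (e.2.1, e.2.2) else t) else t) a l,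
           List.foldl (fun (t : Option (Int × Int)) e =>
             if e.1 = chrom then (if e.2.1 < end_ ∧ pvBetter t e.2.1 e.2.2 = true then some (e.2.1, e.2.2) else t) else t) b l) := by
      intro l
      induction l with
      | nil => intro f a b; rfl
      | cons x t ih =>
        intro f a b
        by_cases hx : x.1 = chrom
        · simp only [List.foldl_cons, hx, if_pos]
          exact ih _ _ _
        · simp only [List.foldl_cons, hx, if_false]
          exact ih f a b
    rw [hsplit]
    have hflag : List.foldl (fun (s : Bool) e => if e.1 = chrom then true else s) false items
        = !es.isEmpty := by
      have h1 : List.foldl (fun (s : Bool) e => if e.1 = chrom then true else s) false items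
          = es.foldl (fun (s : Bool) _ => true) false :=
        foldl_chromFilter chrom (fun s _ => true) items false
      rw [h1, foldl_flag, Bool.false_or]
    have hbs : List.foldl (fun (t : Option (Int × Int)) e =>
          if e.1 = chrom then (if e.2.1 ≤ start ∧ pvBetter t e.2.1 e.2.2 = true then some (e.2.1, e.2.2) else t) else t)
          none items = bestSat (fun p => p.1 ≤ start) es :=
      foldl_chromFilter chrom (bestStep (fun p => p.1 ≤ start)) items none
    have hbe : List.foldl (fun (t : Option (Int × Int)) e =>
          if e.1 = chrom then (if e.2.1 < end_ ∧ pvBetter t e.2.1 e.2.2 = true then some (e.2.1, e.2.2) else t) else t)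
          none items = bestSat (fun p => p.1 < end_) es :=
      foldl_chromFilter chrom (bestStep (fun p => p.1 < end_)) items none
    rw [hflag, hbs, hbe]
    by_cases hnil : es = []
    · rw [hnil]
      simp [sorted2_eq_nil_iff]
    · rw [if_neg ((not_congr (sorted2_eq_nil_iff es)).mpr hnil)]
      have hsplitA : ∀ (l : List (Int × Int)) (a b : Option Int),
          List.foldl (fun (s : Option Int × Option Int) p =>
            (if p.1 ≤ start then some p.2 else s.1, if p.1 < end_ then some p.2 else s.2)) (a, b) l
          = (List.foldl (fun (o : Option Int) p => if p.1 ≤ start then some p.2 else o) a l,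
             List.foldl (fun (o : Option Int) p => if p.1 < end_ then some p.2 else o) b l) := by
        intro l
        induction l with
        | nil => intro a b; rfl
        | cons x t ih => intro a b; simp only [List.foldl_cons]; exact ih _ _
      rw [hsplitA]
      have hA1 : List.foldl (fun (o : Option Int) p => if p.1 ≤ start then some p.2 else o) none
          (PySem.List.sorted2 es Prod.fst Prod.snd)
          = (lastSat (fun p => p.1 ≤ start) (PySem.List.sorted2 es Prod.fst Prod.snd)).map Prod.snd :=
        foldl_idx_eq_map (fun p => p.1 ≤ start) Prod.snd (PySem.List.sorted2 es Prod.fst Prod.snd) none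
      have hA2 : List.foldl (fun (o : Option Int) p => if p.1 < end_ then some p.2 else o) none
          (PySem.List.sorted2 es Prod.fst Prod.snd)
          = (lastSat (fun p => p.1 < end_) (PySem.List.sorted2 es Prod.fst Prod.snd)).map Prod.snd :=
        foldl_idx_eq_map (fun p => p.1 < end_) Prod.snd (PySem.List.sorted2 es Prod.fst Prod.snd) none
      rw [hA1, hA2, last_sorted_eq_best, last_sorted_eq_best]
      have hne : (!es.isEmpty) = true := by simp [hnil]
      rw [hne, if_pos rfl]
      cases bestSat (fun p => p.1 < end_) es <;> rfl
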